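-- pv_equiv track=rewrite | github.com/Scythe6699/22683179_ISE_Assignment_2025 | src/life_path_number.py | life_path_number
-- ===== SOURCE A (Python) =====
-- def life_path_number(day, month, year):
--     # master numbers
--     master_num = [11, 22, 33]
--
--     # add digits
--     def add_digit(data):
--         total = 0
--         for digit in str(data):
--             total += int(digit)
--
--         return total
--
--     # greater than 9
--     def greater_formatter(num):
--         if num <= 9:
--             return num
--         elif num in master_num:
--             return num
--         return greater_formatter(add_digit(num))
--
--     # life path check
--     ## get the individual sums
--     day_sum = day if day in master_num else greater_formatter(day)
--     month_sum = month if month in master_num else greater_formatter(month)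
--     year_sum = year if year in master_num else greater_formatter(year)
--
--     ## total
--     total = day_sum + month_sum + year_sum
--
--     ## check if total is a master number or needs further reduction
--     if total in master_num:
--         return total
--     elif total > 9:
--         return greater_formatter(total)
--
--     return total
-- ===== SOURCE B (Python) =====
-- def life_path_number(day, month, year):
--     # Iterative reducer using pure integer arithmetic: no str() round-trip.
--     # Safe: only values > 9 (hence positive) are ever digit-summed, where
--     # arithmetic digit sum equals A's string-based digit sum.
--     def reduce(n):
--         while n > 9 and n not in (11, 22, 33):
--             s = 0
--             while n:
--                 s += n % 10
--                 n //= 10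
--             n = s
--         return n
--     return reduce(reduce(day) + reduce(month) + reduce(year))
-- ===== Notes on version B (the rewrite author's own statement) =====
-- stated objective: alternative
-- what changed: Replaces the recursive string-based greater_formatter (str()/int() per digit) plus three redundant outer master-number guards with one iterative while-loop reducer that digit-sums purely arithmetically via % 10 and // 10.
import Mathlib
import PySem

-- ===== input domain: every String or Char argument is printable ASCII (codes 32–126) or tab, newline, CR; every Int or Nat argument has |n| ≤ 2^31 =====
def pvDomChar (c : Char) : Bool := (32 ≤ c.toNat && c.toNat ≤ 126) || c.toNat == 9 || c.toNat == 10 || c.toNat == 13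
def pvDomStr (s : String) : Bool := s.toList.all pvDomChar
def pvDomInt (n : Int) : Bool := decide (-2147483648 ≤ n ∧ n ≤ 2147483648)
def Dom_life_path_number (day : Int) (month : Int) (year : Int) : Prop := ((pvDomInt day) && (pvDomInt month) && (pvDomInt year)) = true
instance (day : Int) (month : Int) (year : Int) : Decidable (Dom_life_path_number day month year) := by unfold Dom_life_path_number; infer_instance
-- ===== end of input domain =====

-- B replaces the recursive string-based greater_formatter (and A's three redundant outer
-- master-number guards) with one iterative reducer that digit-sums purely arithmetically
-- via % 10 and // 10 (alternative decomposition, same cost).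
-- Loops are ported as structural recursion on a fuel bound (n.toNat fuel; each pass strictly
-- shrinks a positive n, so the fuel is never exhausted — proved in the fuel lemmas below).

-- ===== PORT A =====
-- int(c) for a single char c; in A only digit characters ever reach it,
-- so the .getD 0 totalization of the ValueError case is never exercised.
def pvCharInt (c : Char) : Int := (PySem.Int.ofChars? [c]).getD 0

-- add_digit: total = 0; for digit in str(data): total += int(digit)
def addDigit (data : Int) : Int :=
  (PySem.Int.toChars data).foldl (fun total digit => total + pvCharInt digit) 0

-- greater_formatter: recursive digit reduction, master numbers pass through
def gfGo : Nat → Int → Int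
  | 0, num => num
  | fuel + 1, num =>
    if num ≤ 9 then num
    else if num ∈ ([11, 22, 33] : List Int) then num
    else gfGo fuel (addDigit num)

def greaterFormatter (num : Int) : Int := gfGo num.toNat num

def life_path_number (day : Int) (month : Int) (year : Int) : Int :=
  let master_num : List Int := [11, 22, 33]
  let day_sum := if day ∈ master_num then day else greaterFormatter day
  let month_sum := if month ∈ master_num then month else greaterFormatter month
  let year_sum := if year ∈ master_num then year else greaterFormatter year
  let total := day_sum + month_sum + year_sum
  if total ∈ master_num then total
  else if total > 9 then greaterFormatter total
  else total

-- ===== PORT B =====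
-- inner loop: s = 0; while n: s += n % 10; n //= 10   (only ever entered with n > 9)
def dsGo : Nat → Int → Int → Int
  | 0, _, s => s
  | fuel + 1, n, s =>
    if n ≤ 0 then s
    else dsGo fuel (PySem.Int.floordiv n 10) (s + PySem.Int.mod n 10)

def pvDsum (n : Int) : Int := dsGo n.toNat n 0

-- outer loop: while n > 9 and n not in (11, 22, 33): n = <arithmetic digit sum of n>
def rdGo : Nat → Int → Int
  | 0, n => n
  | fuel + 1, n =>
    if 9 < n ∧ n ∉ ([11, 22, 33] : List Int) then rdGo fuel (pvDsum n)
    else n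

def reduceB (n : Int) : Int := rdGo n.toNat n

def life_path_number_alt (day : Int) (month : Int) (year : Int) : Int :=
  reduceB (reduceB day + reduceB month + reduceB year)

-- ===== PRECONDITION & SPEC =====
def Spec_life_path_number (day : Int) (month : Int) (year : Int) (out : Int) : Prop := out = life_path_number_alt day month year
instance (day : Int) (month : Int) (year : Int) (out : Int) : Decidable (Spec_life_path_number day month year out) := by unfold Spec_life_path_number; infer_instance

-- ===== CLAIM (what is proved, stated in full; the proofs are below) =====
def Claim_equal_life_path_number : Prop := ∀ (day : Int) (month : Int) (year : Int), Dom_life_path_number day month year → Spec_life_path_number day month year (life_path_number day month year)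

-- ===== LEMMAS AND PROOFS =====

-- characterising the string-based digit sum
theorem pv_toDigitsCore_eq (f : Nat) : ∀ (n : Nat) (acc : List Char), n ≤ f → 0 < n →
    Nat.toDigitsCore 10 f n acc = ((Nat.digits 10 n).map Nat.digitChar).reverse ++ acc := by
  induction f with
  | zero => intro n acc h1 h2; omega
  | succ f ih =>
    intro n acc h1 h2
    rw [Nat.toDigitsCore, Nat.digits_def' (by norm_num : (1:Nat) < 10) h2]
    by_cases hx : n / 10 = 0
    · simp [hx]
    · have hlt : n / 10 ≤ f := by omega
      rw [if_neg hx, ih (n / 10) _ hlt (Nat.pos_of_ne_zero hx)]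
      simp

theorem pv_charInt_digitChar {d : Nat} (h : d < 10) : pvCharInt (Nat.digitChar d) = (d : Int) := by
  interval_cases d <;> decide

theorem pv_charSum_eq (n : Nat) (h : 0 < n) :
    (((Nat.toDigits 10 n).map pvCharInt).sum) = ((Nat.digits 10 n).sum : Int) := by
  rw [Nat.toDigits, pv_toDigitsCore_eq (n + 1) n [] (by omega) h]
  rw [List.append_nil, List.map_reverse, List.sum_reverse, List.map_map]
  have : ∀ d ∈ Nat.digits 10 n, (pvCharInt ∘ Nat.digitChar) d = (d : Int) := by
    intro d hd
    exact pv_charInt_digitChar (Nat.digits_lt_base (by norm_num) hd)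
  rw [List.map_congr_left this]
  simp [Nat.cast_list_sum]

theorem pv_digits_sum_lt (n : Nat) (h : 10 ≤ n) : (Nat.digits 10 n).sum < n := by
  rw [Nat.digits_def' (by norm_num : (1:Nat) < 10) (by omega)]
  have h1 := Nat.digit_sum_le 10 (n / 10)
  have h2 : n % 10 < 10 := Nat.mod_lt _ (by norm_num)
  have h3 : 10 * (n / 10) + n % 10 = n := Nat.div_add_mod n 10
  simp only [List.sum_cons]
  omega

theorem pv_addDigit_eq (n : Int) (h : 9 < n) : addDigit n = ((Nat.digits 10 n.toNat).sum : Int) := by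
  have hn : ¬ n < 0 := by omega
  rw [addDigit, PySem.List.foldl_add, Int.zero_add, PySem.Int.toChars, if_neg hn]
  exact pv_charSum_eq n.toNat (by omega)

theorem pv_addDigit_lt (num : Int) (h : 9 < num) : (addDigit num).toNat < num.toNat := by
  rw [pv_addDigit_eq num h]
  have := pv_digits_sum_lt num.toNat (by omega)
  omega

-- characterising the arithmetic digit sum
theorem pv_dsGo_eq (f : Nat) : ∀ (n s : Int), 0 ≤ n → n.toNat ≤ f →
    dsGo f n s = s + ((Nat.digits 10 n.toNat).sum : Int) := by
  induction f with
  | zero =>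
    intro n s hn hk
    have : n = 0 := by omega
    simp [dsGo, this]
  | succ f ih =>
    intro n s hn hk
    rw [dsGo]
    by_cases h0 : n ≤ 0
    · have : n = 0 := by omega
      simp [this]
    · rw [if_neg h0, PySem.Int.floordiv_eq_ediv_of_pos (by norm_num), PySem.Int.mod_eq_emod_of_pos (by norm_num)]
      rw [ih (n / 10) _ (Int.ediv_nonneg (by omega) (by norm_num)) (by omega)]
      conv_rhs => rw [Nat.digits_def' (by norm_num : (1:Nat) < 10) (show 0 < n.toNat by omega)]
      have hdiv : (n / 10).toNat = n.toNat / 10 := by omega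
      have hmod : n % 10 = ((n.toNat % 10 : Nat) : Int) := by omega
      rw [hdiv, hmod]
      simp only [List.sum_cons]
      push_cast
      ring

theorem pv_dsum_eq (n : Int) (hn : 0 ≤ n) : pvDsum n = ((Nat.digits 10 n.toNat).sum : Int) := by
  rw [pvDsum, pv_dsGo_eq n.toNat n 0 hn (le_refl _), Int.zero_add]

-- on positive inputs the string-based and arithmetic digit sums coincide
theorem pv_addDigit_eq_dsum (n : Int) (h : 9 < n) : addDigit n = pvDsum n := by
  rw [pv_addDigit_eq n h, pv_dsum_eq n (by omega)]

theorem pv_dsum_lt (n : Int) (h : 9 < n) : (pvDsum n).toNat < n.toNat := by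
  rw [pv_dsum_eq n (by omega)]
  have := pv_digits_sum_lt n.toNat (by omega)
  omega

-- fuel-insensitivity: unconditional step/pass equations for the two reducers
theorem gfGo_congr (f : Nat) : ∀ (g : Nat) (n : Int), n.toNat ≤ f → n.toNat ≤ g → gfGo f n = gfGo g n := by
  induction f with
  | zero =>
    intro g n hf hg
    have h9 : n ≤ 9 := by omega
    cases g <;> simp [gfGo, h9]
  | succ f ih =>
    intro g n hf hg
    by_cases h9 : n ≤ 9
    · cases g <;> simp [gfGo, h9]
    · by_cases hm : n ∈ ([11, 22, 33] : List Int)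
      · cases g with
        | zero => fin_cases hm <;> omega
        | succ g => simp [gfGo, h9, hm]
      · cases g with
        | zero => omega
        | succ g =>
          rw [gfGo, gfGo, if_neg h9, if_neg h9, if_neg hm, if_neg hm]
          have := pv_addDigit_lt n (by omega)
          exact ih g (addDigit n) (by omega) (by omega)

theorem gf_le (n : Int) (h : n ≤ 9) : greaterFormatter n = n := by
  rw [greaterFormatter]; cases hn : n.toNat <;> simp [gfGo, h]

theorem gf_master (n : Int) (h : n ∈ ([11, 22, 33] : List Int)) : greaterFormatter n = n := by
  have h9 : ¬ n ≤ 9 := by fin_cases h <;> omega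
  rw [greaterFormatter]
  cases hn : n.toNat with
  | zero => rfl
  | succ m => simp [gfGo, h9, h]

theorem gf_step (n : Int) (h9 : ¬ n ≤ 9) (hm : n ∉ ([11, 22, 33] : List Int)) :
    greaterFormatter n = greaterFormatter (addDigit n) := by
  have hlt := pv_addDigit_lt n (by omega)
  rw [greaterFormatter, greaterFormatter]
  obtain ⟨m, hmn⟩ : ∃ m, n.toNat = m + 1 := ⟨n.toNat - 1, by omega⟩
  rw [hmn, gfGo, if_neg h9, if_neg hm]
  exact gfGo_congr m (addDigit n).toNat (addDigit n) (by omega) (le_refl _)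

theorem rdGo_congr (f : Nat) : ∀ (g : Nat) (n : Int), n.toNat ≤ f → n.toNat ≤ g → rdGo f n = rdGo g n := by
  induction f with
  | zero =>
    intro g n hf hg
    have h : ¬ (9 < n ∧ n ∉ ([11, 22, 33] : List Int)) := by rw [not_and]; intro h; omega
    cases g with
    | zero => rfl
    | succ g => simp only [rdGo]; rw [if_neg h]
  | succ f ih =>
    intro g n hf hg
    by_cases h : 9 < n ∧ n ∉ ([11, 22, 33] : List Int)
    · cases g with
      | zero => omega
      | succ g =>
        rw [rdGo, rdGo, if_pos h, if_pos h]
        have := pv_dsum_lt n h.1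
        exact ih g (pvDsum n) (by omega) (by omega)
    · cases g with
      | zero => simp only [rdGo]; rw [if_neg h]
      | succ g => simp only [rdGo]; rw [if_neg h, if_neg h]

theorem rd_pass (n : Int) (h : ¬ (9 < n ∧ n ∉ ([11, 22, 33] : List Int))) : reduceB n = n := by
  rw [reduceB]
  cases hn : n.toNat with
  | zero => rfl
  | succ m => simp only [rdGo]; rw [if_neg h]

theorem rd_step (n : Int) (h : 9 < n ∧ n ∉ ([11, 22, 33] : List Int)) :
    reduceB n = reduceB (pvDsum n) := by
  have hlt := pv_dsum_lt n h.1
  rw [reduceB, reduceB]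
  obtain ⟨m, hmn⟩ : ∃ m, n.toNat = m + 1 := ⟨n.toNat - 1, by omega⟩
  rw [hmn, rdGo, if_pos h]
  exact rdGo_congr m (pvDsum n).toNat (pvDsum n) (by omega) (le_refl _)

-- the recursive formatter and the iterative arithmetic reducer agree everywhere
theorem gf_eq_reduce_aux (k : Nat) : ∀ (n : Int), n.toNat ≤ k → greaterFormatter n = reduceB n := by
  induction k with
  | zero =>
    intro n hk
    rw [gf_le n (by omega), rd_pass n (by rw [not_and]; intro h; omega)]
  | succ k ih =>
    intro n hk
    by_cases h9 : n ≤ 9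
    · rw [gf_le n h9, rd_pass n (by rw [not_and]; intro h; omega)]
    · by_cases hm : n ∈ ([11, 22, 33] : List Int)
      · rw [gf_master n hm, rd_pass n (by rw [not_and]; intro _ h; exact h hm)]
      · rw [gf_step n h9 hm, rd_step n ⟨by omega, hm⟩, pv_addDigit_eq_dsum n (by omega)]
        have := pv_dsum_lt n (by omega)
        exact ih (pvDsum n) (by omega)

theorem gf_eq_reduce (n : Int) : greaterFormatter n = reduceB n :=
  gf_eq_reduce_aux n.toNat n (le_refl _)

theorem reduce_id_of_le (n : Int) (h : n ≤ 9) : reduceB n = n :=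
  rd_pass n (by rw [not_and]; intro h'; omega)

theorem reduce_id_of_master (n : Int) (h : n ∈ ([11, 22, 33] : List Int)) : reduceB n = n :=
  rd_pass n (by rw [not_and]; intro _ h'; exact h' h)

-- A's guarded component sum equals B's reducer
theorem component_eq (n : Int) :
    (if n ∈ ([11, 22, 33] : List Int) then n else greaterFormatter n) = reduceB n := by
  by_cases hm : n ∈ ([11, 22, 33] : List Int)
  · rw [if_pos hm, reduce_id_of_master n hm]
  · rw [if_neg hm, gf_eq_reduce]

-- ===== VERDICT (by name: the statement is the Claim_ definition above) =====
theorem life_path_number_spec : Claim_equal_life_path_number := by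
  intro day month year _
  show life_path_number day month year = life_path_number_alt day month year
  rw [life_path_number, life_path_number_alt]
  simp only [component_eq]
  by_cases hm : reduceB day + reduceB month + reduceB year ∈ ([11, 22, 33] : List Int)
  · rw [if_pos hm, reduce_id_of_master _ hm]
  · rw [if_neg hm]
    by_cases h9 : reduceB day + reduceB month + reduceB year > 9
    · rw [if_pos h9, gf_eq_reduce]
    · rw [if_neg h9, reduce_id_of_le (reduceB day + reduceB month + reduceB year) (by omega)]
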